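-- pv_equiv track=rewrite | github.com/jinghaox/algorithms | practice/lc1354_construct_target_array_with_multiple_sums.py | construct_target_array_with_multiple_sums
-- ===== SOURCE A (Python) =====
-- from heapq import heappop, heappush
--
-- def construct_target_array_with_multiple_sums(target):
--     sums = sum(target)
--     # sums can be used to calculate the sum of the rest elements
--     # first sums contains all elements
--     # after we take the first max, then sums is the sum of the rest (also need remainder, see below)
--     heap = []
--     for t in target:
--         heappush(heap, -t)
--
--     while sums > len(target):       # sum([1,...,1]) is actually len(target)
--         max_t = -1*heappop(heap)    # max_heap
--         rest_sum = sums - max_t     # sums=9+5+3=17, 17-9 = 8, actually is 5+3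
--         if max_t < rest_sum:        # 如果为真，表示不可能用1 + rest_sum来构成max_t，所以是False
--             return False
--         if rest_sum == 0:           # corner case
--             return False
--         rmdr = max_t % rest_sum     # 现在检查max_t - n*rest_sum后，剩下多少，即求模，因为不管n是1还是100，都可以重复得到
--                                     # e.g [89, 5, 3], where 89 = 10*(5+3) + 1, 所以它等同于 [9, 5, 3]
--         if rmdr == 0:               # 如果可以整除，那么就检查rest_sum是否恰好为1，这个只有一种情况，即rest_sum已经只剩1的时候
--                                     # 这时候任何数%1都是0，所以肯定是可以的
--                                     # 如果是其它数，比如%2==0，那肯定是不可以的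
--             return rest_sum == 1
--         # sums = sums - (max_t - rmdr)  # 实际上这就是rest_sum + prev，即 [max_t, a, b,...]，在减去max_t后，变成[a,b,..., rmdr]
--                                         # 其更新的sums = sum(a,b,...) + rmdr = rest_sum + rmdr
--         sums = rest_sum + rmdr
--         heappush(heap, -rmdr)       # 这时再将rmdr加到heap里
--     return True
-- ===== SOURCE B (Python) =====
-- def construct_target_array_with_multiple_sums(target):
--     lst = sorted(target, reverse=True)
--     sums = sum(lst)
--     n = len(lst)
--     while sums > n:
--         max_t = lst.pop(0)          # head of a descending list is the maximum
--         rest_sum = sums - max_t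
--         if max_t < rest_sum or rest_sum == 0:
--             return False
--         rmdr = max_t % rest_sum
--         if rmdr == 0:
--             return rest_sum == 1
--         # put rmdr back at its sorted (descending) position
--         i = 0
--         while i < len(lst) and lst[i] > rmdr:
--             i += 1
--         lst.insert(i, rmdr)
--         sums = rest_sum + rmdr
--     return True
-- ===== Notes on version B (the rewrite author's own statement) =====
-- stated objective: alternative
-- what changed: Replaces the negated max-heap with a list sorted once in descending order and kept sorted: each round pops the head (the maximum) and re-inserts the remainder at its sorted position via a linear scan, instead of heappop/heappush on a sign-flipped heap.
import Mathlib
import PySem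

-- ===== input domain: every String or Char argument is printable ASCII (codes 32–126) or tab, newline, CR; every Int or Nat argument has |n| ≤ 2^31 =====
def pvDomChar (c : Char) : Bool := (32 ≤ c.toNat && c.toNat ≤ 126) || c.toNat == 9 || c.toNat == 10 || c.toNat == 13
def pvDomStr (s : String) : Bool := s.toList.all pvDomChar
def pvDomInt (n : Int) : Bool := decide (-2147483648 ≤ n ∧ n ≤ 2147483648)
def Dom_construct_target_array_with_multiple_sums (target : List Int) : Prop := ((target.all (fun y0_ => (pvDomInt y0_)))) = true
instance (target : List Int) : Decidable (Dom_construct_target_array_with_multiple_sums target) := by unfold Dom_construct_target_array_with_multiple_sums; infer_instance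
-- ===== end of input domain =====

-- B replaces the negated max-heap by a list sorted once in descending order and kept sorted:
-- pop the head, re-insert the remainder at its sorted position (objective: alternative).

-- Shared termination fact, cited by both loops: one iteration strictly shrinks sums - n.
theorem pvStepDec (n : Nat) (sums max_t : Int)
    (h1 : (n : Int) < sums)
    (h2 : ¬ max_t < sums - max_t)
    (h3 : ¬ sums - max_t = 0)
    (_h4 : ¬ PySem.Int.mod max_t (sums - max_t) = 0) :
    (sums - max_t + PySem.Int.mod max_t (sums - max_t) - (n : Int)).toNat
      < (sums - (n : Int)).toNat := by
  rcases lt_trichotomy (sums - max_t) 0 with hneg | hz | hpos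
  · have hb := PySem.Int.mod_neg_bounds max_t hneg
    omega
  · exact absurd hz h3
  · have h5 := PySem.Int.mod_nonneg max_t hpos
    have h6 := PySem.Int.mod_lt max_t hpos
    omega

-- ===== PORT A =====
-- A's while-loop. The heap is modelled by the multiset of its elements (a List Int):
-- heappop returns the minimum element and removes one occurrence of it, heappush adds its
-- element; the heap's internal array layout never affects A's result. The `none` branch
-- (empty heap, where Python's heappop would raise IndexError) is unreachable from the entry
-- call: the loop runs only when sums > len(target) ≥ 0 and the heap always holds exactly
-- len(target) elements, so it is only a totality guard.
def pvLoopA (n : Nat) (sums : Int) (heap : List Int) : Bool :=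
  if (n : Int) < sums then
    match PySem.List.min? heap (fun x => x) with
    | none => true
    | some m =>
      let max_t := -1 * m
      let rest_sum := sums - max_t
      if max_t < rest_sum then false
      else if rest_sum = 0 then false
      else
        let rmdr := PySem.Int.mod max_t rest_sum
        if rmdr = 0 then decide (rest_sum = 1)
        else pvLoopA n (rest_sum + rmdr) (-rmdr :: heap.erase m)
  else true
termination_by (sums - (n : Int)).toNat
decreasing_by
  exact pvStepDec n sums (-1 * m) (by assumption) (by assumption) (by assumption) (by assumption)

def construct_target_array_with_multiple_sums (target : List Int) : Bool :=
  let sums := target.foldl (· + ·) 0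
  let heap := target.foldl (fun h t => -t :: h) []
  pvLoopA target.length sums heap

-- ===== PORT B =====
-- The inner while-loop of Source B that finds the descending-sorted position of rmdr and
-- inserts it there, written as the structural recursion it performs.
def pvInsertDesc (x : Int) : List Int → List Int
  | [] => [x]
  | y :: ys => if x < y then y :: pvInsertDesc x ys else x :: y :: ys

-- B's while-loop over the descending-sorted list: lst.pop(0) is the head pattern match,
-- the `[]` branch (where Python's pop(0) would raise IndexError) is unreachable from the
-- entry call, exactly as in A.
def pvLoopB (n : Nat) (sums : Int) (lst : List Int) : Bool :=
  if (n : Int) < sums then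
    match lst with
    | [] => true
    | max_t :: rest =>
      let rest_sum := sums - max_t
      if max_t < rest_sum ∨ rest_sum = 0 then false
      else
        let rmdr := PySem.Int.mod max_t rest_sum
        if rmdr = 0 then decide (rest_sum = 1)
        else pvLoopB n (rest_sum + rmdr) (pvInsertDesc rmdr rest)
  else true
termination_by (sums - (n : Int)).toNat
decreasing_by
  refine pvStepDec n sums max_t (by assumption) ?_ ?_ (by assumption) <;> tauto

def construct_target_array_with_multiple_sums_alt (target : List Int) : Bool :=
  let lst := PySem.List.sorted target (fun x => x) true
  pvLoopB target.length (lst.foldl (· + ·) 0) lst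

-- ===== PRECONDITION & SPEC =====
def Spec_construct_target_array_with_multiple_sums (target : List Int) (out : Bool) : Prop := out = construct_target_array_with_multiple_sums_alt target
instance (target : List Int) (out : Bool) : Decidable (Spec_construct_target_array_with_multiple_sums target out) := by unfold Spec_construct_target_array_with_multiple_sums; infer_instance

-- ===== CLAIM (what is proved, stated in full; the proofs are below) =====
def Claim_equal_construct_target_array_with_multiple_sums : Prop := ∀ (target : List Int), Dom_construct_target_array_with_multiple_sums target → Spec_construct_target_array_with_multiple_sums target (construct_target_array_with_multiple_sums target)

-- ===== LEMMAS AND PROOFS =====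

theorem pvInsertDesc_perm (x : Int) (l : List Int) : (pvInsertDesc x l).Perm (x :: l) := by
  induction l with
  | nil => simp [pvInsertDesc]
  | cons y ys ih =>
    by_cases h : x < y
    · simp only [pvInsertDesc, if_pos h]
      exact ((ih.cons y).trans (List.Perm.swap x y ys))
    · simp [pvInsertDesc, h]

theorem pvInsertDesc_sorted (x : Int) (l : List Int)
    (hs : l.Pairwise (fun a b => b ≤ a)) :
    (pvInsertDesc x l).Pairwise (fun a b : Int => b ≤ a) := by
  induction l with
  | nil => simp [pvInsertDesc]
  | cons y ys ih =>
    rcases List.pairwise_cons.mp hs with ⟨hy, hys⟩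
    by_cases h : x < y
    · simp only [pvInsertDesc, if_pos h]
      refine List.pairwise_cons.mpr ⟨?_, ih hys⟩
      intro z hz
      rcases List.mem_cons.mp ((pvInsertDesc_perm x ys).mem_iff.mp hz) with hzx | hzm
      · omega
      · exact hy z hzm
    · simp only [pvInsertDesc, if_neg h]
      refine List.pairwise_cons.mpr ⟨?_, hs⟩
      intro z hz
      rcases List.mem_cons.mp hz with rfl | hz
      · omega
      · have := hy z hz; omega

-- The two loops agree whenever A's heap is a permutation of the sign-flipped descending list.
theorem pvLoop_eq (n : Nat) (sums : Int) (heap lst : List Int)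
    (hp : heap.Perm (lst.map (fun x => -x)))
    (hs : lst.Pairwise (fun a b => b ≤ a)) :
    pvLoopA n sums heap = pvLoopB n sums lst := by
  rw [pvLoopA, pvLoopB.eq_def]
  by_cases hc : (n : Int) < sums
  · simp only [if_pos hc]
    match lst, hp, hs with
    | [], hp, _ =>
      have : heap = [] := by simpa using hp.eq_nil
      simp [this, PySem.List.min?]
    | M :: rest, hp, hs =>
      have hMmax : ∀ y ∈ M :: rest, y ≤ M := by
        intro y hy
        rcases List.mem_cons.mp hy with rfl | hy
        · omega
        · exact (List.pairwise_cons.mp hs).1 y hy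
      have hne : heap ≠ [] := by
        intro h0; rw [h0] at hp; exact absurd hp.symm.eq_nil (by simp)
      rcases hm : PySem.List.min? heap (fun x => x) with _ | m
      · exact absurd ((PySem.List.min?_eq_none_iff heap _).mp hm) hne
      · have hmmem : m ∈ heap := PySem.List.min?_mem hm
        have hmM : m = -M := by
          rcases List.mem_map.mp (hp.mem_iff.mp hmmem) with ⟨y, hy, hym⟩
          have hyM : y ≤ M := hMmax y hy
          have h2 : -M ∈ heap := hp.mem_iff.mpr (List.mem_map.mpr ⟨M, by simp, rfl⟩)
          have h3 : m ≤ -M := PySem.List.min?_isMin hm _ h2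
          omega
        subst hmM
        have hmt : -1 * -M = M := by ring
        dsimp only
        rw [hmt]
        by_cases hg1 : M < sums - M
        · simp [hg1]
        · by_cases hg2 : sums - M = 0
          · simp [hg2]
          · simp only [if_neg hg1, if_neg hg2, if_neg (by tauto : ¬ (M < sums - M ∨ sums - M = 0))]
            by_cases hg3 : PySem.Int.mod M (sums - M) = 0
            · simp [hg3]
            · simp only [if_neg hg3]
              apply pvLoop_eq
              · -- multiset invariant after one step
                have he : (heap.erase (-M)).Perm (rest.map (fun x => -x)) := by
                  have := (hp.erase (-M))
                  simpa using this
                refine List.Perm.trans (he.cons _) ?_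
                exact ((pvInsertDesc_perm _ rest).map _).symm
              · exact pvInsertDesc_sorted _ _ (List.pairwise_cons.mp hs).2
  · simp [hc]
termination_by (sums - (n : Int)).toNat
decreasing_by
  exact pvStepDec n sums M hc (by tauto) (by tauto) hg3

-- The initial heap (each -t pushed in turn) is the reversed sign-flipped target.
theorem pvFoldNeg (l acc : List Int) :
    l.foldl (fun h t => -t :: h) acc = (l.map (fun x => -x)).reverse ++ acc := by
  induction l generalizing acc with
  | nil => simp
  | cons x t ih => simp [List.foldl_cons, ih]

-- foldl (+) is permutation-invariant: A sums target, B sums the sorted list.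
theorem pvSumPerm (l l' : List Int) (h : l.Perm l') :
    l.foldl (· + ·) 0 = l'.foldl (· + ·) 0 := by
  rw [← List.sum_eq_foldl, ← List.sum_eq_foldl]
  exact h.sum_eq

-- ===== VERDICT (by name: the statement is the Claim_ definition above) =====
theorem construct_target_array_with_multiple_sums_spec : Claim_equal_construct_target_array_with_multiple_sums := by
  intro target _
  unfold Spec_construct_target_array_with_multiple_sums
  unfold construct_target_array_with_multiple_sums construct_target_array_with_multiple_sums_alt
  dsimp only
  have hperm : (PySem.List.sorted target (fun x => x) true).Perm target :=
    PySem.List.sorted_perm target (fun x => x) true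
  rw [pvSumPerm target _ hperm.symm,
      ← hperm.length_eq]
  refine pvLoop_eq _ _ _ _ ?_ ?_
  · rw [pvFoldNeg, List.append_nil]
    exact (List.reverse_perm (target.map (fun x => -x))).trans (hperm.symm.map _)
  · exact PySem.List.sorted_pairwise_rev target (fun x => x)
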